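-- pv_equiv track=rewrite | github.com/ernestogarozzo/ecommerce | easy_bot_real_money/functions.py | str_log
-- ===== SOURCE A (Python) =====
-- def str_log(value,name):
--     str_value = str(value) + " "
--     len_value = len(str(value))
--     len_name = len(name)
--     if len_value < len_name :
--         for i in range(len_name - len_value - 1):
--             str_value = " " + str_value
--     return str_value
-- ===== SOURCE B (Python) =====
-- def str_log(value, name):
--     s = str(value)
--     return " " * max(0, len(name) - len(s) - 1) + s + " "
-- ===== Notes on version B (the rewrite author's own statement) =====
-- stated objective: faster
-- what changed: Replaces the character-by-character prepend loop (quadratic repeated string copies) with a closed-form computation of the padding width and a single string multiplication.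
import Mathlib
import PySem

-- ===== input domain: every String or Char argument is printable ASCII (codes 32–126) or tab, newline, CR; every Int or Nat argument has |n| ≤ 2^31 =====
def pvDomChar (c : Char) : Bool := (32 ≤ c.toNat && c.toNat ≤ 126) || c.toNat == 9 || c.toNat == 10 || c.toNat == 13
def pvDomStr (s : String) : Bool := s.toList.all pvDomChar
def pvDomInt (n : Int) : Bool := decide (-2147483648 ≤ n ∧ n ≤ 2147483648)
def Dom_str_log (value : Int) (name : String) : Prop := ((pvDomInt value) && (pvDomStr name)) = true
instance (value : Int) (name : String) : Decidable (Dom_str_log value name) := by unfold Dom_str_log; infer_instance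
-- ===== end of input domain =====

-- B replaces A's character-by-character prepend loop with a closed-form padding width and one replicate (objective: simpler).

-- ===== PORT A =====
def str_log (value : Int) (name : String) : String :=
  let str_value := PySem.Int.toStr value ++ " "
  let len_value : Int := PySem.Str.len (PySem.Int.toStr value)
  let len_name : Int := PySem.Str.len name
  if len_value < len_name then
    (PySem.List.pyRange 0 (len_name - len_value - 1) 1).foldl (fun acc _ => " " ++ acc) str_value
  else
    str_value

-- ===== PORT B =====
def str_log_alt (value : Int) (name : String) : String :=
  let s := PySem.Int.toStr value
  let n : Int := max 0 (PySem.Str.len name - PySem.Str.len s - 1)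
  String.ofList (List.replicate n.toNat ' ') ++ s ++ " "

-- ===== PRECONDITION & SPEC =====
def Spec_str_log (value : Int) (name : String) (out : String) : Prop := out = str_log_alt value name
instance (value : Int) (name : String) (out : String) : Decidable (Spec_str_log value name out) := by unfold Spec_str_log; infer_instance

-- ===== CLAIM (what is proved, stated in full; the proofs are below) =====
def Claim_equal_str_log : Prop := ∀ (value : Int) (name : String), Dom_str_log value name → Spec_str_log value name (str_log value name)

-- ===== LEMMAS AND PROOFS =====

theorem replicate_append_cons_space (n : Nat) (l : List Char) :
    List.replicate n ' ' ++ ' ' :: l = ' ' :: (List.replicate n ' ' ++ l) := by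
  induction n with
  | zero => simp
  | succ k ih => simp [List.replicate_succ, ih]

theorem space_toList : " ".toList = [' '] := rfl

-- A's prepend loop over any list of length k prepends exactly k spaces.
theorem foldl_prepend_space (l : List Int) (acc : String) :
    l.foldl (fun acc _ => " " ++ acc) acc = String.ofList (List.replicate l.length ' ') ++ acc := by
  induction l generalizing acc with
  | nil => simp
  | cons x xs ih =>
      simp only [List.foldl_cons, ih, List.length_cons]
      apply String.toList_injective
      simp only [String.toList_append, String.toList_ofList, List.replicate_succ, space_toList,
        List.cons_append]
      exact replicate_append_cons_space _ _

-- ===== VERDICT (by name: the statement is the Claim_ definition above) =====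
theorem str_log_spec : Claim_equal_str_log := by
  intro value name _
  unfold Spec_str_log str_log str_log_alt
  simp only []
  split
  · next h =>
      rw [foldl_prepend_space, PySem.List.length_pyRange_one, String.append_assoc]
      have : (PySem.Str.len name - PySem.Str.len (PySem.Int.toStr value) - 1 - 0).toNat
           = (max 0 (PySem.Str.len name - PySem.Str.len (PySem.Int.toStr value) - 1)).toNat := by
        omega
      rw [this]
  · next h =>
      have : (max 0 (PySem.Str.len name - PySem.Str.len (PySem.Int.toStr value) - 1)).toNat = 0 := by
        omega
      rw [this]
      simp
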